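-- pv_equiv track=rewrite | github.com/dorbian/thebigtree | bigtree/modules/cardgames.py | _normalize_rank
-- ===== SOURCE A (Python) =====
-- from typing import Any, Dict, List, Optional, Tuple
--
-- RANKS = ["A", "2", "3", "4", "5", "6", "7", "8", "9", "10", "J", "Q", "K"]
--
-- def _normalize_rank(value: Any) -> Optional[str]:
--     text = str(value or "").strip().upper()
--     if not text:
--         return None
--     if text in RANKS:
--         return text
--     if text.isdigit():
--         num = int(text)
--         if num == 1:
--             return "A"
--         if num == 11:
--             return "J"
--         if num == 12:
--             return "Q"
--         if num == 13:
--             return "K"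
--         if 2 <= num <= 10:
--             return str(num)
--     roman = {"I":1,"II":2,"III":3,"IV":4,"V":5,"VI":6,"VII":7,"VIII":8,"IX":9,"X":10,"XI":11,"XII":12,"XIII":13}
--     if text in roman:
--         return _normalize_rank(roman[text])
--     return None
-- ===== SOURCE B (Python) =====
-- from typing import Any, Optional
--
-- RANKS = ["A", "2", "3", "4", "5", "6", "7", "8", "9", "10", "J", "Q", "K"]
--
-- _ROMANS = ["I", "II", "III", "IV", "V", "VI", "VII", "VIII", "IX", "X",
--            "XI", "XII", "XIII"]
--
-- def _normalize_rank(value: Any) -> Optional[str]: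
--     # Linear search: for each candidate rank i (1..13), accept text if it is
--     # that rank's own spelling, its roman spelling, or a digit string worth i.
--     text = str(value or "").strip().upper()
--     if not text:
--         return None
--     num = int(text) if text.isdigit() else None
--     for i, rank in enumerate(RANKS, 1):
--         if text == rank or text == _ROMANS[i - 1] or num == i:
--             return rank
--     return None
-- ===== Notes on version B (the rewrite author's own statement) =====
-- stated objective: alternative
-- what changed: B replaces A's membership test, digit branch table and recursive roman re-entry by one linear search over the 13 candidate ranks, returning the first rank whose own spelling, roman spelling or numeric value matches the text.
import Mathlib
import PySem

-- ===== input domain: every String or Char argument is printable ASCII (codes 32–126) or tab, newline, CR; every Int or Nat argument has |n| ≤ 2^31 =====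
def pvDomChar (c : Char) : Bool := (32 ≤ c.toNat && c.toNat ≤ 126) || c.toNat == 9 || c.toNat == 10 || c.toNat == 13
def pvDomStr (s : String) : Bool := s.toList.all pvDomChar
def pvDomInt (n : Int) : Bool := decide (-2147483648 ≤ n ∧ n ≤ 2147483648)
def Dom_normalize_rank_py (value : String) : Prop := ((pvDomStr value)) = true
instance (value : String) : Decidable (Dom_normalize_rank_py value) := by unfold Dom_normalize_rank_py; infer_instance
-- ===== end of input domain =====

-- B replaces A's branch tables and recursive self-call by a single linear search over the 13
-- candidate ranks, accepting the first whose rank/roman/number spelling matches; objective: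
-- alternative decomposition (no speed claim).

-- ===== PORT A =====
def pvRanks : List String := ["A", "2", "3", "4", "5", "6", "7", "8", "9", "10", "J", "Q", "K"]

def pvRoman : PySem.Dict String Int :=
  PySem.Dict.mk [("I",1),("II",2),("III",3),("IV",4),("V",5),("VI",6),("VII",7),
                     ("VIII",8),("IX",9),("X",10),("XI",11),("XII",12),("XIII",13)]

-- fuel only makes the recursion total; depth is ≤ 2 (the recursive argument is a digit string,
-- which is never a roman key), so fuel 0 is never reached from `normalize_rank_py`.
-- The recursive Python call `_normalize_rank(roman[text])` passes an int n (1..13, never falsy);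
-- Python's `str(n or "")` there is `str(n)`, ported as `PySem.Int.toStr n`.
def normalize_rank_py_go : Nat → String → Option String
  | 0, _ => none
  | fuel+1, value =>
    let text := PySem.Str.upper (PySem.Str.strip value)   -- str(value or "").strip().upper(); value is a str
    if text = "" then none
    else if text ∈ pvRanks then some text
    else
      -- the isdigit block; `none` here = Python falling through to the roman check
      let digitRes : Option String :=
        if PySem.Str.strIsdigit text then
          let num := (PySem.Int.ofStr? text).getD 0   -- int(text); some on every ASCII digit string
          if num = 1 then some "A"
          else if num = 11 then some "J"
          else if num = 12 then some "Q"
          else if num = 13 then some "K"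
          else if 2 ≤ num ∧ num ≤ 10 then some (PySem.Int.toStr num)
          else none
        else none
      match digitRes with
      | some r => some r
      | none =>
        match pvRoman.get? text with
        | some n => normalize_rank_py_go fuel (PySem.Int.toStr n)
        | none => none

def normalize_rank_py (value : String) : Option String := normalize_rank_py_go 2 value

-- ===== PORT B =====
def pvRomans : List String := ["I","II","III","IV","V","VI","VII","VIII","IX","X","XI","XII","XIII"]

-- the `for i, rank in enumerate(RANKS, 1)` loop; `_ROMANS[i-1]` is carried alongside `rank`
-- by zipping the two equal-length lists, which is exact here.
def normalize_rank_py_alt_go (text : String) (num : Option Int) : Int → List (String × String) → Option String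
  | _, [] => none
  | i, (rank, rom) :: rest =>
    if text = rank ∨ text = rom ∨ num = some i then some rank
    else normalize_rank_py_alt_go text num (i + 1) rest

def normalize_rank_py_alt (value : String) : Option String :=
  let text := PySem.Str.upper (PySem.Str.strip value)
  if text = "" then none
  else
    let num : Option Int :=
      if PySem.Str.strIsdigit text then some ((PySem.Int.ofStr? text).getD 0) else none
    normalize_rank_py_alt_go text num 1 (pvRanks.zip pvRomans)

-- ===== PRECONDITION & SPEC =====
def Spec_normalize_rank_py (value : String) (out : Option String) : Prop := out = normalize_rank_py_alt value
instance (value : String) (out : Option String) : Decidable (Spec_normalize_rank_py value out) := by unfold Spec_normalize_rank_py; infer_instance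

-- ===== CLAIM (what is proved, stated in full; the proofs are below) =====
def Claim_equal_normalize_rank_py : Prop := ∀ (value : String), Dom_normalize_rank_py value → Spec_normalize_rank_py value (normalize_rank_py value)

-- ===== LEMMAS AND PROOFS =====

-- a failed Dict lookup means the key matches no pair of the literal list
lemma dict_get?_none_ne {κ ν : Type} [BEq κ] [LawfulBEq κ] (l : List (κ × ν)) (t : κ)
    (h : (PySem.Dict.mk l).get? t = none) : ∀ p ∈ l, p.1 ≠ t := by
  induction l with
  | nil => simp
  | cons p rest ih =>
    rcases p with ⟨k, v⟩
    rw [PySem.Dict.get?_mk_cons] at h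
    by_cases hb : (k == t) = true
    · rw [if_pos hb] at h; exact absurd h (by simp)
    · rw [if_neg hb] at h
      intro q hq
      rcases List.mem_cons.mp hq with rfl | hmem
      · simpa using hb
      · exact ih h q hmem

-- a successful Dict lookup came from a pair of the literal list
lemma dict_get?_mem {κ ν : Type} [BEq κ] [LawfulBEq κ] (l : List (κ × ν)) (t : κ) (n : ν)
    (h : (PySem.Dict.mk l).get? t = some n) : (t, n) ∈ l := by
  induction l with
  | nil => simp [PySem.Dict.get?] at h
  | cons p rest ih =>
    rcases p with ⟨k, v⟩
    rw [PySem.Dict.get?_mk_cons] at h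
    by_cases hb : (k == t) = true
    · rw [if_pos hb] at h
      cases eq_of_beq hb
      injection h with h'
      subst h'
      exact List.mem_cons_self
    · rw [if_neg hb] at h
      exact List.mem_cons_of_mem _ (ih h)

-- ===== VERDICT (by name: the statement is the Claim_ definition above) =====
set_option maxHeartbeats 2000000 in
theorem normalize_rank_py_spec : Claim_equal_normalize_rank_py := by
  intro value _
  unfold Spec_normalize_rank_py normalize_rank_py normalize_rank_py_alt
  rw [normalize_rank_py_go]
  generalize PySem.Str.upper (PySem.Str.strip value) = t
  by_cases h0 : t = ""
  · rw [if_pos h0, if_pos h0]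
  · rw [if_neg h0, if_neg h0]
    by_cases hr : t ∈ pvRanks
    · -- t is one of the 13 rank literals: both sides close by computation
      rw [if_pos hr]
      simp only [pvRanks, List.mem_cons, List.not_mem_nil, or_false] at hr
      rcases hr with rfl|rfl|rfl|rfl|rfl|rfl|rfl|rfl|rfl|rfl|rfl|rfl|rfl <;> decide
    · rw [if_neg hr]
      simp only [pvRanks, List.mem_cons, List.not_mem_nil, or_false, not_or] at hr
      obtain ⟨r1,r2,r3,r4,r5,r6,r7,r8,r9,r10,r11,r12,r13⟩ := hr
      rcases hget : pvRoman.get? t with _ | n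
      · -- t is not a roman key
        have hrom := dict_get?_none_ne _ t hget
        simp only [List.mem_cons, List.not_mem_nil, or_false, forall_eq_or_imp,
          forall_eq] at hrom
        obtain ⟨m1,m2,m3,m4,m5,m6,m7,m8,m9,m10,m11,m12,m13⟩ := hrom
        by_cases hd : PySem.Str.strIsdigit t = true
        · rw [if_pos hd, if_pos hd]
          set n := (PySem.Int.ofStr? t).getD 0 with hn
          clear_value n
          have hloop : ∀ num : Int,
              normalize_rank_py_alt_go t (some num) 1 (pvRanks.zip pvRomans) =
                if num = 1 then some "A" else if num = 2 then some "2"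
                else if num = 3 then some "3" else if num = 4 then some "4"
                else if num = 5 then some "5" else if num = 6 then some "6"
                else if num = 7 then some "7" else if num = 8 then some "8"
                else if num = 9 then some "9" else if num = 10 then some "10"
                else if num = 11 then some "J" else if num = 12 then some "Q"
                else if num = 13 then some "K" else none := by
            intro num
            simp only [pvRanks, pvRomans, List.zip, List.zipWith, normalize_rank_py_alt_go,
              r1,r2,r3,r4,r5,r6,r7,r8,r9,r10,r11,r12,r13,
              Ne.symm m1, Ne.symm m2, Ne.symm m3, Ne.symm m4, Ne.symm m5, Ne.symm m6,
              Ne.symm m7, Ne.symm m8, Ne.symm m9, Ne.symm m10, Ne.symm m11, Ne.symm m12,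
              Ne.symm m13, false_or, Option.some.injEq]
            norm_num
          rw [hloop]
          by_cases h1 : n = 1
          · subst h1; decide
          · by_cases h11 : n = 11
            · subst h11; decide
            · by_cases h12 : n = 12
              · subst h12; decide
              · by_cases h13 : n = 13
                · subst h13; decide
                · by_cases hc : 2 ≤ n ∧ n ≤ 10
                  · rw [if_neg h1, if_neg h11, if_neg h12, if_neg h13, if_pos hc]
                    obtain ⟨hc1, hc2⟩ := hc
                    interval_cases n <;> decide
                  · have hk : ∀ k : Int, 2 ≤ k → k ≤ 10 → ¬ n = k := by omega
                    simp only [h1, h11, h12, h13, hc,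
                      hk 2 (by norm_num) (by norm_num), hk 3 (by norm_num) (by norm_num),
                      hk 4 (by norm_num) (by norm_num), hk 5 (by norm_num) (by norm_num),
                      hk 6 (by norm_num) (by norm_num), hk 7 (by norm_num) (by norm_num),
                      hk 8 (by norm_num) (by norm_num), hk 9 (by norm_num) (by norm_num),
                      hk 10 (by norm_num) (by norm_num), if_false]
        · -- not a digit string either: both sides return none
          rw [if_neg hd, if_neg hd]
          simp [pvRanks, pvRomans, List.zip, List.zipWith, normalize_rank_py_alt_go,
            r1,r2,r3,r4,r5,r6,r7,r8,r9,r10,r11,r12,r13,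
            Ne.symm m1, Ne.symm m2, Ne.symm m3, Ne.symm m4, Ne.symm m5, Ne.symm m6,
            Ne.symm m7, Ne.symm m8, Ne.symm m9, Ne.symm m10, Ne.symm m11, Ne.symm m12,
            Ne.symm m13]
      · -- t is one of the 13 roman literals: both sides close by computation
        have hmem := dict_get?_mem _ t n hget
        simp only [List.mem_cons, List.not_mem_nil, or_false, Prod.mk.injEq] at hmem
        rcases hmem with ⟨rfl,rfl⟩|⟨rfl,rfl⟩|⟨rfl,rfl⟩|⟨rfl,rfl⟩|⟨rfl,rfl⟩|⟨rfl,rfl⟩|⟨rfl,rfl⟩|⟨rfl,rfl⟩|⟨rfl,rfl⟩|⟨rfl,rfl⟩|⟨rfl,rfl⟩|⟨rfl,rfl⟩|⟨rfl,rfl⟩ <;> decide
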